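-- pv_equiv track=rewrite | github.com/wendy-a/interview_prep | random/8trainspoint.py | trainpot
-- ===== SOURCE A (Python) =====
-- def trainpot(k, exist):
--     rest = k - len(exist)
--     count = 1
--     for i in range(rest):
--         if count in exist:
--             while count in exist:
--                 count += 1
--         count += 1
--     return count - 1
-- ===== SOURCE B (Python) =====
-- def trainpot(k, exist):
--     rest = k - len(exist)
--     if rest <= 0:
--         return 0
--     ans = rest
--     for s in sorted(set(exist)):
--         if 0 < s <= ans:
--             ans += 1
--     return ans
-- ===== Notes on version B (the rewrite author's own statement) =====
-- stated objective: alternative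
-- what changed: A counts up one integer at a time, scanning exist for membership at every step; B instead sorts the distinct elements once and makes a single pass over them, shifting the candidate answer past each distinct positive element that is at most the current answer.
import Mathlib
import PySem

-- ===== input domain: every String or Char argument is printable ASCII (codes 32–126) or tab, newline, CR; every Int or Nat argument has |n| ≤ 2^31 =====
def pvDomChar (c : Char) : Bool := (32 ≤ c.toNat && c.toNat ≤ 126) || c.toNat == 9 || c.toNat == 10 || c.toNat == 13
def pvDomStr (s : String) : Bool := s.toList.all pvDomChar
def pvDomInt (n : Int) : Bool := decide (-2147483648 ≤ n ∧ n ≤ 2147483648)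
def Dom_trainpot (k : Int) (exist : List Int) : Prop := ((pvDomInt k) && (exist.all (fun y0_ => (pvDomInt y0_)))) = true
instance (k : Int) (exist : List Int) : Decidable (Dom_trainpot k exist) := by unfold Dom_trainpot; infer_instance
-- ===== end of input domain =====

-- B replaces A's step-by-step counting loop (a membership scan of exist per counted integer)
-- by sorting the distinct elements once and shifting the candidate answer past each distinct
-- positive element in a single pass; same return value on every input.

-- ===== PORT A =====
-- inner loop 'while count in exist: count += 1'; fuel exist.length is enough to reach the
-- fixpoint, because a run of consecutive integers all in exist has at most exist.length values
def trainpotWhile (exist : List Int) : Nat → Int → Int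
  | 0, count => count
  | fuel+1, count => if count ∈ exist then trainpotWhile exist fuel (count + 1) else count

def trainpot (k : Int) (exist : List Int) : Int :=
  let rest := k - (exist.length : Int)
  let count := (PySem.List.pyRange 0 rest 1).foldl
    (fun count _ => (if count ∈ exist then trainpotWhile exist exist.length count else count) + 1) 1
  count - 1

-- ===== PORT B =====
def trainpot_alt (k : Int) (exist : List Int) : Int :=
  let rest := k - (exist.length : Int)
  if rest ≤ 0 then 0
  else (PySem.List.sorted (PySem.Set.ofList exist) (fun x => x) false).foldl
    (fun ans s => if 0 < s ∧ s ≤ ans then ans + 1 else ans) rest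

-- ===== PRECONDITION & SPEC =====
def Spec_trainpot (k : Int) (exist : List Int) (out : Int) : Prop := out = trainpot_alt k exist
instance (k : Int) (exist : List Int) (out : Int) : Decidable (Spec_trainpot k exist out) := by unfold Spec_trainpot; infer_instance

-- ===== CLAIM (what is proved, stated in full; the proofs are below) =====
def Claim_equal_trainpot : Prop := ∀ (k : Int) (exist : List Int), Dom_trainpot k exist → Spec_trainpot k exist (trainpot k exist)

-- ===== LEMMAS AND PROOFS =====

-- number of distinct members of `exist` in (0, x]
def pvCnt (exist : List Int) (x : Int) : Nat :=
  (((List.range x.toNat).map (fun i : Nat => (i : Int) + 1)).filter (fun s => decide (s ∈ exist))).length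

theorem pvCnt_eq (exist : List Int) (x : Int) :
    pvCnt exist x = ((Finset.Ioc 0 x).filter (fun s => s ∈ exist)).card := by
  unfold pvCnt
  have hnd : (((List.range x.toNat).map (fun i : Nat => (i : Int) + 1)).filter
      (fun s => decide (s ∈ exist))).Nodup := by
    refine List.Nodup.filter _ (List.Nodup.map ?_ List.nodup_range)
    intro i j h
    have h' : (i : Int) + 1 = (j : Int) + 1 := h
    omega
  rw [← List.toFinset_card_of_nodup hnd]
  congr 1
  ext d
  simp only [List.mem_toFinset, List.mem_filter, List.mem_map, List.mem_range,
    Finset.mem_filter, Finset.mem_Ioc, decide_eq_true_eq]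
  constructor
  · rintro ⟨⟨i, hi, rfl⟩, hmem⟩
    exact ⟨⟨by omega, by omega⟩, hmem⟩
  · rintro ⟨⟨h1, h2⟩, hmem⟩
    exact ⟨⟨(d - 1).toNat, by omega, by omega⟩, hmem⟩

theorem pvCnt_zero (exist : List Int) : pvCnt exist 0 = 0 := by
  simp [pvCnt]

theorem pvCnt_split (exist : List Int) {x y : Int} (hx : 0 ≤ x) (hxy : x ≤ y) :
    pvCnt exist y = pvCnt exist x + ((Finset.Ioc x y).filter (fun s => s ∈ exist)).card := by
  rw [pvCnt_eq, pvCnt_eq]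
  rw [← Finset.card_union_of_disjoint, ← Finset.filter_union,
      Finset.Ioc_union_Ioc_eq_Ioc hx hxy]
  rw [Finset.disjoint_left]
  intro a ha hb
  simp only [Finset.mem_filter, Finset.mem_Ioc] at ha hb
  omega

theorem pvCnt_step (exist : List Int) {x r : Int} (hx : 0 ≤ x) (hr : x < r)
    (hmem : ∀ d, x < d → d < r → d ∈ exist) (hnr : r ∉ exist) :
    pvCnt exist r = pvCnt exist x + (r - 1 - x).toNat := by
  rw [pvCnt_split exist hx (le_of_lt hr)]
  congr 1
  have h : (Finset.Ioc x r).filter (fun s => s ∈ exist) = Finset.Ioc x (r - 1) := by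
    ext d
    simp only [Finset.mem_filter, Finset.mem_Ioc]
    constructor
    · rintro ⟨⟨h1, h2⟩, h3⟩
      have : d ≠ r := fun he => hnr (he ▸ h3)
      omega
    · rintro ⟨h1, h2⟩
      exact ⟨⟨h1, by omega⟩, hmem d h1 (by omega)⟩
  rw [h, Int.card_Ioc]

theorem pvCnt_inj_lt (exist : List Int) {R x y : Int} (hx : 1 ≤ x)
    (hny : y ∉ exist)
    (hex : x = R + (pvCnt exist x : Int)) (hey : y = R + (pvCnt exist y : Int))
    (hlt : x < y) : False := by
  have hsplit := pvCnt_split exist (by omega : (0:Int) ≤ x) (le_of_lt hlt)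
  have hsub : (Finset.Ioc x y).filter (fun s => s ∈ exist) ⊆ Finset.Ioc x (y - 1) := by
    intro d hd
    simp only [Finset.mem_filter, Finset.mem_Ioc] at hd ⊢
    have : d ≠ y := fun he => hny (he ▸ hd.2)
    omega
  have hcard := Finset.card_le_card hsub
  rw [Int.card_Ioc] at hcard
  omega

theorem pvCnt_inj (exist : List Int) {R x y : Int} (hx : 1 ≤ x) (hy : 1 ≤ y)
    (hnx : x ∉ exist) (hny : y ∉ exist)
    (hex : x = R + (pvCnt exist x : Int)) (hey : y = R + (pvCnt exist y : Int)) : x = y := by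
  rcases lt_trichotomy x y with h | h | h
  · exact absurd (pvCnt_inj_lt exist hx hny hex hey h) (fun f => f)
  · exact h
  · exact absurd (pvCnt_inj_lt exist hy hnx hey hex h) (fun f => f)

-- strict decrease of the remaining-members measure for the while loop
theorem pvFilter_mono (c : Int) (l : List Int) :
    (l.filter (fun s => decide (c + 1 ≤ s))).length ≤ (l.filter (fun s => decide (c ≤ s))).length := by
  induction l with
  | nil => simp
  | cons a t ih =>
    simp only [List.filter_cons]
    split_ifs with h1 h2 h2 <;> simp_all <;> omega

theorem pvFilter_strict (c : Int) (l : List Int) (hc : c ∈ l) :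
    (l.filter (fun s => decide (c + 1 ≤ s))).length < (l.filter (fun s => decide (c ≤ s))).length := by
  induction l with
  | nil => simp at hc
  | cons a t ih =>
    simp only [List.filter_cons]
    rcases List.mem_cons.mp hc with h | h
    · have hmono := pvFilter_mono c t
      split_ifs with h1 h2 h2 <;> simp_all
    · have := ih h
      split_ifs with h1 h2 h2 <;> simp_all <;> omega

theorem trainpotWhile_spec (exist : List Int) :
    ∀ (fuel : Nat) (c : Int), (exist.filter (fun s => decide (c ≤ s))).length ≤ fuel →
    trainpotWhile exist fuel c ∉ exist ∧ c ≤ trainpotWhile exist fuel c ∧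
      ∀ d, c ≤ d → d < trainpotWhile exist fuel c → d ∈ exist := by
  intro fuel
  induction fuel with
  | zero =>
    intro c hlen
    have hc : c ∉ exist := by
      intro hmem
      have := pvFilter_strict c exist hmem
      have := pvFilter_mono c exist
      omega
    exact ⟨hc, le_refl c, fun d h1 h2 => by simp [trainpotWhile] at h2; omega⟩
  | succ n ih =>
    intro c hlen
    by_cases hc : c ∈ exist
    · have hdec := pvFilter_strict c exist hc
      have ⟨ha, hb, hd⟩ := ih (c + 1) (by omega)
      simp only [trainpotWhile, if_pos hc]
      refine ⟨ha, by omega, fun d h1 h2 => ?_⟩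
      rcases eq_or_lt_of_le h1 with h | h
      · exact h ▸ hc
      · exact hd d (by omega) h2
    · simp only [trainpotWhile, if_neg hc]
      exact ⟨hc, le_refl c, fun d h1 h2 => by omega⟩

-- one iteration of A's outer loop
def pvStepA (exist : List Int) (c : Int) : Int :=
  (if c ∈ exist then trainpotWhile exist exist.length c else c) + 1

theorem pvStepA_spec (exist : List Int) (c : Int) :
    let r := pvStepA exist c - 1
    r ∉ exist ∧ c ≤ r ∧ ∀ d, c ≤ d → d < r → d ∈ exist := by
  unfold pvStepA
  by_cases hc : c ∈ exist
  · simp only [if_pos hc, add_sub_cancel_right]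
    exact trainpotWhile_spec exist exist.length c (List.length_filter_le _ _)
  · simp only [if_neg hc, add_sub_cancel_right]
    exact ⟨hc, le_refl c, fun d h1 h2 => by omega⟩

theorem pvFoldA (exist : List Int) (l : List Int) (x : Int) :
    l.foldl (fun count _ =>
      (if count ∈ exist then trainpotWhile exist exist.length count else count) + 1) x =
    (pvStepA exist)^[l.length] x := by
  induction l generalizing x with
  | nil => rfl
  | cons a t ih =>
    simp only [List.foldl_cons, List.length_cons, Function.iterate_succ_apply]
    exact ih (pvStepA exist x)

-- A's loop invariant: after n iterations, count-1 is ≥ n, has n distinct members of exist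
-- below it (among positives), and (for n ≥ 1) is not itself a member
theorem pvAInv (exist : List Int) (n : Nat) :
    (n : Int) ≤ (pvStepA exist)^[n] 1 - 1 ∧
    (pvStepA exist)^[n] 1 - 1 = (n : Int) + (pvCnt exist ((pvStepA exist)^[n] 1 - 1) : Int) ∧
    (1 ≤ n → (pvStepA exist)^[n] 1 - 1 ∉ exist) := by
  induction n with
  | zero => simp [pvCnt_zero]
  | succ m ih =>
    obtain ⟨h1, h2, _⟩ := ih
    set p := (pvStepA exist)^[m] 1 with hp
    have hit : (pvStepA exist)^[m+1] 1 = pvStepA exist p := by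
      rw [Function.iterate_succ_apply']
    obtain ⟨ha, hb, hc⟩ := pvStepA_spec exist p
    set r := pvStepA exist p - 1 with hr
    have hx : (0:Int) ≤ p - 1 := by omega
    have hxr : p - 1 < r := by omega
    have hcnt := pvCnt_step exist hx hxr (fun d hd1 hd2 => hc d (by omega) hd2) ha
    rw [hit]
    refine ⟨by push_cast; omega, ?_, fun _ => ha⟩
    push_cast
    rw [← hr, hcnt]
    push_cast
    omega

-- B's fold leaves the accumulator unchanged when every element is above it
theorem pvBStay (L : List Int) (r : Int) (h : ∀ s ∈ L, r < s) :
    L.foldl (fun ans s => if 0 < s ∧ s ≤ ans then ans + 1 else ans) r = r := by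
  induction L with
  | nil => rfl
  | cons a t ih =>
    have ha := h a (List.mem_cons_self)
    simp only [List.foldl_cons, if_neg (by omega : ¬(0 < a ∧ a ≤ r))]
    exact ih (fun s hs => h s (List.mem_cons_of_mem a hs))

-- characterisation of B's fold over a strictly increasing list
theorem pvBChar (L : List Int) (r : Int) (hL : L.Pairwise (· < ·)) (hr : 1 ≤ r) :
    r ≤ L.foldl (fun ans s => if 0 < s ∧ s ≤ ans then ans + 1 else ans) r ∧
    L.foldl (fun ans s => if 0 < s ∧ s ≤ ans then ans + 1 else ans) r ∉ L ∧
    L.foldl (fun ans s => if 0 < s ∧ s ≤ ans then ans + 1 else ans) r =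
      r + ((L.filter (fun s => decide (0 < s ∧ s ≤
        L.foldl (fun ans s => if 0 < s ∧ s ≤ ans then ans + 1 else ans) r))).length : Int) := by
  induction L generalizing r with
  | nil => simp
  | cons a t ih =>
    have hpair := (List.pairwise_cons.mp hL).1
    have htail := (List.pairwise_cons.mp hL).2
    by_cases hcase : 0 < a ∧ a ≤ r
    · simp only [List.foldl_cons, if_pos hcase]
      obtain ⟨i1, i2, i3⟩ := ih (r + 1) htail (by omega)
      set res := t.foldl (fun ans s => if 0 < s ∧ s ≤ ans then ans + 1 else ans) (r + 1) with hres
      refine ⟨by omega, ?_, ?_⟩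
      · intro hmem
        rcases List.mem_cons.mp hmem with h | h
        · omega
        · exact i2 h
      · rw [List.filter_cons, if_pos (by simp; omega)]
        simp only [List.length_cons]
        push_cast
        omega
    · by_cases hpos : 0 < a
      · have har : r < a := by omega
        have hall : ∀ s ∈ a :: t, r < s := by
          intro s hs
          rcases List.mem_cons.mp hs with h | h
          · omega
          · have := hpair s h; omega
        rw [pvBStay _ r hall]
        refine ⟨le_refl r, fun hmem => by have := hall r hmem; omega, ?_⟩
        rw [List.filter_eq_nil_iff.mpr (fun s hs => by simp; intro _; have := hall s hs; omega)]
        simp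
      · simp only [List.foldl_cons, if_neg (by omega : ¬(0 < a ∧ a ≤ r))]
        obtain ⟨i1, i2, i3⟩ := ih r htail hr
        set res := t.foldl (fun ans s => if 0 < s ∧ s ≤ ans then ans + 1 else ans) r with hres
        refine ⟨i1, ?_, ?_⟩
        · intro hmem
          rcases List.mem_cons.mp hmem with h | h
          · omega
          · exact i2 h
        · rw [List.filter_cons, if_neg (by simp; omega)]
          exact i3

-- the sorted distinct list: membership, nodup, strict increase
theorem pvD_mem (exist : List Int) (s : Int) :
    s ∈ PySem.List.sorted (PySem.Set.ofList exist) (fun x => x) false ↔ s ∈ exist := by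
  rw [PySem.List.mem_sorted, PySem.Set.mem_ofList]

theorem pvD_nodup (exist : List Int) :
    (PySem.List.sorted (PySem.Set.ofList exist) (fun x => x) false).Nodup :=
  (PySem.List.sorted_perm _ _ _).nodup_iff.mpr (PySem.Set.nodup_ofList exist)

theorem pvD_sorted (exist : List Int) :
    (PySem.List.sorted (PySem.Set.ofList exist) (fun x => x) false).Pairwise (· < ·) := by
  have h1 : (PySem.List.sorted (PySem.Set.ofList exist) (fun x => x) false).Pairwise
      (fun a b => (fun x : Int => x) a ≤ (fun x : Int => x) b) :=
    PySem.List.sorted_pairwise _ _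
  have h2 := pvD_nodup exist
  exact (h1.and h2).imp (fun {a b} h => lt_of_le_of_ne h.1 h.2)

-- counting over the nodup list equals the Finset count
theorem pvBridge (exist : List Int) (x : Int) :
    ((PySem.List.sorted (PySem.Set.ofList exist) (fun x => x) false).filter
      (fun s => decide (0 < s ∧ s ≤ x))).length = pvCnt exist x := by
  set D := PySem.List.sorted (PySem.Set.ofList exist) (fun x => x) false with hD
  have hnd : (D.filter (fun s => decide (0 < s ∧ s ≤ x))).Nodup := (pvD_nodup exist).filter _
  rw [← List.toFinset_card_of_nodup hnd, pvCnt_eq]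
  congr 1
  ext d
  simp only [List.mem_toFinset, List.mem_filter, Finset.mem_filter, Finset.mem_Ioc,
    decide_eq_true_eq, hD, pvD_mem]
  tauto

-- ===== VERDICT (by name: the statement is the Claim_ definition above) =====
theorem trainpot_spec : Claim_equal_trainpot := by
  intro k exist _
  unfold Spec_trainpot trainpot trainpot_alt
  simp only []
  set rest := k - (exist.length : Int) with hrest
  rw [pvFoldA]
  have hlen : (PySem.List.pyRange 0 rest 1).length = rest.toNat := by simp [pysem]
  by_cases hr : rest ≤ 0
  · rw [if_pos hr, hlen]
    have : rest.toNat = 0 := by omega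
    rw [this]
    rfl
  · rw [if_neg hr, hlen]
    obtain ⟨a1, a2, a3⟩ := pvAInv exist rest.toNat
    have hcast : ((rest.toNat : Nat) : Int) = rest := by omega
    rw [hcast] at a1 a2
    have a3' := a3 (by omega)
    obtain ⟨b1, b2, b3⟩ := pvBChar _ rest (pvD_sorted exist) (by omega)
    rw [pvBridge exist] at b3
    have b2' : (PySem.List.sorted (PySem.Set.ofList exist) (fun x => x) false).foldl
        (fun ans s => if 0 < s ∧ s ≤ ans then ans + 1 else ans) rest ∉ exist :=
      fun h => b2 ((pvD_mem exist _).mpr h)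
    have := pvCnt_inj exist (R := rest)
      (x := (pvStepA exist)^[rest.toNat] 1 - 1)
      (y := (PySem.List.sorted (PySem.Set.ofList exist) (fun x => x) false).foldl
        (fun ans s => if 0 < s ∧ s ≤ ans then ans + 1 else ans) rest)
      (by omega) (by omega) a3' b2' (by omega) b3
    omega
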